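-- pv_equiv track=rewrite | github.com/vboot2/python-dsa-mastery | day101_graph_greedy/practice_solutions.py | solve
-- ===== SOURCE A (Python) =====
-- from typing import List
-- import heapq
--
-- def solve(courses: List[List[int]]) -> int:
--     """
--     Greedy with max heap:
--     Sort by deadline, add durations, and drop longest if time exceeds deadline.
--     """
--     courses.sort(key=lambda x: x[1])
--     total_time = 0
--     max_heap = []
--
--     for duration, last_day in courses:
--         total_time += duration
--         heapq.heappush(max_heap, -duration)
--
--         if total_time > last_day:
--             total_time += heapq.heappop(max_heap)  # remove longest course
--
--     return len(max_heap)
-- ===== SOURCE B (Python) =====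
-- from typing import List
--
--
-- def solve(courses: List[List[int]]) -> int:
--     """
--     Greedy without a heap:
--     Sort by deadline (in place, like the original), keep a plain list `chosen`
--     of selected durations; on overflow drop the longest via an explicit max-scan.
--     """
--     courses.sort(key=lambda x: x[1])
--     total_time = 0
--     chosen = []
--
--     for duration, last_day in courses:
--         chosen.append(duration)
--         total_time += duration
--
--         if total_time > last_day:
--             mi = 0
--             for i in range(1, len(chosen)):
--                 if chosen[i] > chosen[mi]:
--                     mi = i
--             total_time -= chosen[mi]
--             chosen.pop(mi)
--
--     return len(chosen)
-- ===== Notes on version B (the rewrite author's own statement) =====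
-- stated objective: alternative
-- what changed: Replaced the heapq max-heap of negated durations by a plain list of chosen durations with an explicit max-scan (index of the longest course) and pop on overflow.
import Mathlib
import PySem

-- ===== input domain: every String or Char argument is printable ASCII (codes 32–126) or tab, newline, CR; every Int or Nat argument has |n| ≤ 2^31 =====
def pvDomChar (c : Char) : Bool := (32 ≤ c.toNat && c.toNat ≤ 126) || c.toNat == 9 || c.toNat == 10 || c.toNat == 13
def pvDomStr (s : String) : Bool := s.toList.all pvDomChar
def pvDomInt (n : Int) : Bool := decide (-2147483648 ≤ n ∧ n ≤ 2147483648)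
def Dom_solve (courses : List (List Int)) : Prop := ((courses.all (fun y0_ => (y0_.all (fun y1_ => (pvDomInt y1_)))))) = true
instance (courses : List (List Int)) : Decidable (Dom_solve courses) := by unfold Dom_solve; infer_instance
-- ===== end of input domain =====

-- B replaces A's heapq max-heap of negated durations by a plain list of chosen durations with an
-- explicit max-scan and pop on overflow; both sort `courses` in place (the theorem is about the
-- return value; the in-place sort side effect is identical in A and B).

-- ===== PORT A =====

-- heapq._siftdown(heap, startpos, pos), ported by hand step for step (newitem = heap[pos] is
-- passed explicitly since Lean lists are immutable); '(pos-1) >> 1' is Nat division by 2, exact.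
def pySiftdown (heap : List Int) (newitem : Int) (startpos pos : Nat) : List Int :=
  if _h : startpos < pos then
    let parentpos := (pos - 1) / 2
    let parent := heap.getD parentpos 0
    if newitem < parent then
      pySiftdown (heap.set pos parent) newitem startpos parentpos
    else heap.set pos newitem
  else heap.set pos newitem
termination_by pos
decreasing_by exact lt_of_le_of_lt (Nat.div_le_self _ 2) (Nat.sub_lt (by omega) one_pos)

-- heapq._siftup(heap, pos), ported by hand step for step; endpos = len(heap) is stable because
-- List.set preserves length, so it is recomputed each round, exactly Python's fixed endpos.
def pySiftup (heap : List Int) (newitem : Int) (startpos pos : Nat) : List Int :=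
  if h : 2*pos+1 < heap.length then
    let childpos :=
      if 2*pos+2 < heap.length ∧ ¬ (heap.getD (2*pos+1) 0 < heap.getD (2*pos+2) 0)
      then 2*pos+2 else 2*pos+1
    pySiftup (heap.set pos (heap.getD childpos 0)) newitem startpos childpos
  else pySiftdown (heap.set pos newitem) newitem startpos pos
termination_by heap.length - pos
decreasing_by simp only [List.length_set]; split_ifs <;> omega

-- heapq.heappush
def pyHeappush (heap : List Int) (item : Int) : List Int :=
  pySiftdown (heap ++ [item]) item 0 heap.length

-- heapq.heappop; Python raises IndexError on an empty heap — unreachable in solve (just pushed)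
def pyHeappop (heap : List Int) : Int × List Int :=
  match heap.getLast? with
  | none => (0, [])
  | some lastelt =>
    let rest := heap.dropLast
    if rest.isEmpty then (lastelt, rest)
    else (rest.getD 0 0, pySiftup (rest.set 0 lastelt) lastelt 0 0)

def solve (courses : List (List Int)) : Int :=
  -- courses.sort(key=lambda x: x[1]); x[1]/unpacking exact under Pre_solve (length-2 rows)
  let cs := PySem.List.sorted courses (fun x => PySem.List.pyGetD x 1 0)
  let st := cs.foldl (fun (st : Int × List Int) c =>
      let duration := PySem.List.pyGetD c 0 0
      let last_day := PySem.List.pyGetD c 1 0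
      let total_time := st.1 + duration
      let max_heap := pyHeappush st.2 (-duration)
      if last_day < total_time then
        let p := pyHeappop max_heap
        (total_time + p.1, p.2)
      else (total_time, max_heap)) (0, [])
  (st.2.length : Int)

-- ===== PORT B =====

def solve_alt (courses : List (List Int)) : Int :=
  let cs := PySem.List.sorted courses (fun x => PySem.List.pyGetD x 1 0)
  let st := cs.foldl (fun (st : Int × List Int) c =>
      let duration := PySem.List.pyGetD c 0 0
      let last_day := PySem.List.pyGetD c 1 0
      let chosen := st.2 ++ [duration]
      let total_time := st.1 + duration
      if last_day < total_time then
        -- max-scan: mi = index of the largest chosen duration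
        let mi := (PySem.List.pyRange 1 (chosen.length : Int) 1).foldl
            (fun mi i => if PySem.List.pyGetD chosen mi 0 < PySem.List.pyGetD chosen i 0 then i
                         else mi) 0
        match PySem.List.pop? chosen mi with
        | some p => (total_time - p.1, p.2)
        | none => (total_time, chosen)  -- unreachable: 0 ≤ mi < len(chosen)
      else (total_time, chosen)) (0, [])
  (st.2.length : Int)

-- ===== PRECONDITION & SPEC =====
-- Pre_: each course row must have exactly 2 entries, else Python's 'duration, last_day' unpacking
-- (or the sort key x[1]) raises ValueError/IndexError in both A and B.
def Pre_solve (courses : List (List Int)) : Prop := ∀ c ∈ courses, c.length = 2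
instance (courses : List (List Int)) : Decidable (Pre_solve courses) := by
  unfold Pre_solve; infer_instance
def pvWitness_solve : List (List Int) := [[1, 2], [2, 3]]

def Spec_solve (courses : List (List Int)) (out : Int) : Prop := out = solve_alt courses
instance (courses : List (List Int)) (out : Int) : Decidable (Spec_solve courses out) := by
  unfold Spec_solve; infer_instance

-- ===== CLAIM (what is proved, stated in full; the proofs are below) =====
def Claim_equal_solve : Prop := ∀ (courses : List (List Int)), Dom_solve courses →
  Pre_solve courses → Spec_solve courses (solve courses)

-- ===== LEMMAS AND PROOFS =====

-- `h.getD p 0 ≤ h.getD c 0` for every parent/child pair: the binary-heap invariant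
def IsHeap (h : List Int) : Prop :=
  ∀ i : Nat, 0 < i → i < h.length → h.getD ((i-1)/2) 0 ≤ h.getD i 0

-- heap property away from the hole `pos`
def HoleInv (h : List Int) (pos : Nat) : Prop :=
  ∀ i : Nat, 0 < i → i < h.length → i ≠ pos → (i-1)/2 ≠ pos →
    h.getD ((i-1)/2) 0 ≤ h.getD i 0

lemma getD_set_self (l : List Int) (i : Nat) (a : Int) (h : i < l.length) :
    (l.set i a).getD i 0 = a := by
  simp [List.getD, h]

lemma getD_set_ne (l : List Int) (i j : Nat) (a : Int) (h : j ≠ i) :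
    (l.set i a).getD j 0 = l.getD j 0 := by
  simp [List.getD, List.getElem?_set_ne (by omega : i ≠ j)]

lemma mset_set (l : List Int) (i : Nat) (a : Int) (h : i < l.length) :
    (↑(l.set i a) : Multiset Int) + {l.getD i 0} = (↑l : Multiset Int) + {a} := by
  induction l generalizing i with
  | nil => simp at h
  | cons hd tl ih =>
    cases i with
    | zero =>
      simp only [List.set_cons_zero, List.getD_cons_zero, ← Multiset.cons_coe,
        ← Multiset.singleton_add]
      abel
    | succ n =>
      have hn : n < tl.length := by simpa using h
      have := ih n hn
      simp only [List.set_cons_succ, List.getD_cons_succ, ← Multiset.cons_coe,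
        ← Multiset.singleton_add] at *
      rw [add_assoc, add_assoc, this]

theorem mset_siftdown (heap : List Int) (newitem : Int) (pos : Nat) (h : pos < heap.length) :
    (↑(pySiftdown heap newitem 0 pos) : Multiset Int) + {heap.getD pos 0}
      = (↑heap : Multiset Int) + {newitem} := by
  induction pos using Nat.strong_induction_on generalizing heap with
  | _ pos ih =>
    rw [pySiftdown]
    dsimp only
    split
    · next hpos =>
      split
      · next hlt =>
        have hpp : (pos-1)/2 < pos := lt_of_le_of_lt (Nat.div_le_self _ 2) (Nat.sub_lt (by omega) one_pos)
        have h1 := ih _ hpp (heap.set pos (heap.getD ((pos-1)/2) 0)) (by simp only [List.length_set]; omega)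
        rw [getD_set_ne _ _ _ _ (by omega)] at h1
        have h2 := mset_set heap pos (heap.getD ((pos-1)/2) 0) h
        have h3 : (↑(pySiftdown (heap.set pos (heap.getD ((pos-1)/2) 0)) newitem 0 ((pos-1)/2)) : Multiset Int)
            + {heap.getD pos 0} + {heap.getD ((pos-1)/2) 0}
            = (↑heap : Multiset Int) + {newitem} + {heap.getD ((pos-1)/2) 0} := by
          calc (↑(pySiftdown (heap.set pos (heap.getD ((pos-1)/2) 0)) newitem 0 ((pos-1)/2)) : Multiset Int)
              + {heap.getD pos 0} + {heap.getD ((pos-1)/2) 0}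
              = (↑(pySiftdown (heap.set pos (heap.getD ((pos-1)/2) 0)) newitem 0 ((pos-1)/2)) : Multiset Int)
              + {heap.getD ((pos-1)/2) 0} + {heap.getD pos 0} := by abel
            _ = (↑(heap.set pos (heap.getD ((pos-1)/2) 0)) : Multiset Int) + {newitem} + {heap.getD pos 0} := by rw [h1]
            _ = (↑(heap.set pos (heap.getD ((pos-1)/2) 0)) : Multiset Int) + {heap.getD pos 0} + {newitem} := by abel
            _ = (↑heap : Multiset Int) + {heap.getD ((pos-1)/2) 0} + {newitem} := by rw [h2]
            _ = (↑heap : Multiset Int) + {newitem} + {heap.getD ((pos-1)/2) 0} := by abel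
        exact add_right_cancel h3
      · exact mset_set heap pos newitem h
    · exact mset_set heap pos newitem h

lemma mset_chain (X S H : Multiset Int) (u v w : Int)
    (h1 : X + {v} = S + {w}) (h2 : S + {u} = H + {v}) : X + {u} = H + {w} := by
  have h3 : X + {u} + {v} = H + {w} + {v} := by
    calc X + {u} + {v} = (X + {v}) + {u} := by abel
    _ = S + {w} + {u} := by rw [h1]
    _ = (S + {u}) + {w} := by abel
    _ = H + {v} + {w} := by rw [h2]
    _ = H + {w} + {v} := by abel
  exact add_right_cancel h3

theorem mset_siftup (heap : List Int) (newitem : Int) (pos : Nat) (h : pos < heap.length) :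
    (↑(pySiftup heap newitem 0 pos) : Multiset Int) + {heap.getD pos 0}
      = (↑heap : Multiset Int) + {newitem} := by
  generalize hn : heap.length - pos = n
  induction n using Nat.strong_induction_on generalizing heap pos with
  | _ n ih =>
    rw [pySiftup]
    dsimp only
    split
    · next hc =>
      set cp := if 2*pos+2 < heap.length ∧ ¬ (heap.getD (2*pos+1) 0 < heap.getD (2*pos+2) 0)
        then 2*pos+2 else 2*pos+1 with hcp
      have hcp1 : pos < cp ∧ cp < heap.length := by rw [hcp]; split <;> omega
      have h1 := ih ((heap.set pos (heap.getD cp 0)).length - cp)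
        (by simp only [List.length_set]; omega) _ cp
        (by simp only [List.length_set]; omega) rfl
      rw [getD_set_ne _ _ _ _ (by omega)] at h1
      exact mset_chain _ _ _ _ _ _ h1 (mset_set heap pos (heap.getD cp 0) h)
    · have h1 := mset_siftdown (heap.set pos newitem) newitem pos (by simp only [List.length_set]; omega)
      rw [getD_set_self _ _ _ h] at h1
      have h0 : (↑(pySiftdown (heap.set pos newitem) newitem 0 pos) : Multiset Int)
          = ↑(heap.set pos newitem) := add_right_cancel h1
      rw [h0]
      exact mset_set heap pos newitem h

lemma mset_heappush (heap : List Int) (x : Int) :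
    (↑(pyHeappush heap x) : Multiset Int) = x ::ₘ (↑heap : Multiset Int) := by
  unfold pyHeappush
  have h := mset_siftdown (heap ++ [x]) x heap.length (by simp)
  have hx : (heap ++ [x]).getD heap.length 0 = x := by
    simp [List.getD]
  rw [hx] at h
  rw [add_right_cancel h, Multiset.cons_coe, Multiset.coe_eq_coe]
  exact List.perm_append_singleton x heap

theorem siftdown_isHeap (heap : List Int) (newitem : Int) (pos : Nat)
    (hlen : pos < heap.length)
    (hhole : HoleInv heap pos)
    (hchild : ∀ c : Nat, (c = 2*pos+1 ∨ c = 2*pos+2) → c < heap.length → newitem ≤ heap.getD c 0)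
    (hgp : 0 < pos → ∀ c : Nat, (c = 2*pos+1 ∨ c = 2*pos+2) → c < heap.length →
      heap.getD ((pos-1)/2) 0 ≤ heap.getD c 0) :
    IsHeap (pySiftdown heap newitem 0 pos) := by
  induction pos using Nat.strong_induction_on generalizing heap with
  | _ pos ih =>
    rw [pySiftdown]
    dsimp only
    split
    · next hpos =>
      split
      · next hlt =>
        -- recursive: hole moves to pp
        set pp := (pos-1)/2 with hppdef
        have hpplt : pp < pos := by omega
        apply ih pp hpplt (heap.set pos (heap.getD pp 0))
          (by simp only [List.length_set]; omega)
        · -- HoleInv (heap.set pos parent) pp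
          intro i hi hil hip hpp2
          simp only [List.length_set] at hil
          by_cases hipos : i = pos
          · exact absurd (by omega : (i-1)/2 = pp) hpp2
          · rw [getD_set_ne _ _ _ _ hipos]
            by_cases hppos : (i-1)/2 = pos
            · rw [hppos, getD_set_self _ _ _ hlen]
              exact hgp hpos i (by omega) hil
            · rw [getD_set_ne _ _ _ _ hppos]
              exact hhole i hi hil hipos hppos
        · -- hchild at pp
          intro c hc hcl
          simp only [List.length_set] at hcl
          by_cases hcpos : c = pos
          · rw [hcpos, getD_set_self _ _ _ hlen]; exact le_of_lt hlt
          · rw [getD_set_ne _ _ _ _ hcpos]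
            have := hhole c (by omega) hcl hcpos (by omega : (c-1)/2 ≠ pos)
            have hceq : (c-1)/2 = pp := by omega
            rw [hceq] at this
            exact le_trans (le_of_lt hlt) this
        · -- hgp at pp
          intro hpp0 c hc hcl
          simp only [List.length_set] at hcl
          have hgppos : (pp-1)/2 ≠ pos := by omega
          rw [getD_set_ne _ _ _ _ hgppos]
          have hedge : heap.getD ((pp-1)/2) 0 ≤ heap.getD pp 0 :=
            hhole pp hpp0 (by omega) (by omega) (by omega)
          by_cases hcpos : c = pos
          · rw [hcpos, getD_set_self _ _ _ hlen]; exact hedge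
          · rw [getD_set_ne _ _ _ _ hcpos]
            have hedge2 : heap.getD ((c-1)/2) 0 ≤ heap.getD c 0 :=
              hhole c (by omega) hcl hcpos (by omega)
            have hceq : (c-1)/2 = pp := by omega
            rw [hceq] at hedge2
            exact le_trans hedge hedge2
      · next hge =>
        -- stop: place newitem at pos
        intro i hi hil
        simp only [List.length_set] at hil
        by_cases hipos : i = pos
        · subst hipos
          rw [getD_set_self _ _ _ hlen, getD_set_ne _ _ _ _ (by omega : (i-1)/2 ≠ i)]
          omega
        · rw [getD_set_ne _ _ _ _ hipos]
          by_cases hppos : (i-1)/2 = pos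
          · rw [hppos, getD_set_self _ _ _ hlen]
            exact hchild i (by omega) hil
          · rw [getD_set_ne _ _ _ _ hppos]
            exact hhole i hi hil hipos hppos
    · next hpos =>
      -- pos = 0
      have hp0 : pos = 0 := by omega
      subst hp0
      intro i hi hil
      simp only [List.length_set] at hil
      by_cases hppos : (i-1)/2 = 0
      · rw [hppos, getD_set_self _ _ _ hlen, getD_set_ne _ _ _ _ (by omega : i ≠ 0)]
        exact hchild i (by omega) hil
      · rw [getD_set_ne _ _ _ _ hppos, getD_set_ne _ _ _ _ (by omega : i ≠ 0)]
        exact hhole i hi hil (by omega) hppos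

theorem siftup_isHeap (heap : List Int) (newitem : Int) (pos : Nat)
    (hlen : pos < heap.length)
    (hhole : HoleInv heap pos)
    (hgp : 0 < pos → ∀ c : Nat, (c = 2*pos+1 ∨ c = 2*pos+2) → c < heap.length →
      heap.getD ((pos-1)/2) 0 ≤ heap.getD c 0) :
    IsHeap (pySiftup heap newitem 0 pos) := by
  generalize hn : heap.length - pos = n
  induction n using Nat.strong_induction_on generalizing heap pos with
  | _ n ih =>
    rw [pySiftup]
    dsimp only
    split
    · next hc =>
      set cp := if 2*pos+2 < heap.length ∧ ¬ (heap.getD (2*pos+1) 0 < heap.getD (2*pos+2) 0)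
        then 2*pos+2 else 2*pos+1 with hcp
      have hcpb : (cp = 2*pos+1 ∨ cp = 2*pos+2) ∧ cp < heap.length := by
        rw [hcp]; split <;> [exact ⟨Or.inr rfl, by omega⟩; exact ⟨Or.inl rfl, hc⟩]
      have hmin : ∀ i : Nat, (i = 2*pos+1 ∨ i = 2*pos+2) → i < heap.length → i ≠ cp →
          heap.getD cp 0 ≤ heap.getD i 0 := by
        intro i hi hil hine
        rw [hcp]
        rw [hcp] at hine
        split
        · next hcond =>
          have : i = 2*pos+1 := by split at hine <;> omega
          subst this
          exact le_of_not_gt hcond.2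
        · next hcond =>
          have hieq : i = 2*pos+2 := by split at hine <;> omega
          subst hieq
          rw [not_and_or, not_not] at hcond
          rcases hcond with h1 | h2
          · omega
          · exact le_of_lt h2
      apply ih ((heap.set pos (heap.getD cp 0)).length - cp)
        (by simp only [List.length_set]; omega) _ cp
        (by simp only [List.length_set]; omega)
      · -- HoleInv heap' cp
        intro i hi hil hicp hpcp
        simp only [List.length_set] at hil
        by_cases hipos : i = pos
        · subst hipos
          rw [getD_set_self _ _ _ hlen,
            getD_set_ne _ _ _ _ (by omega : (i-1)/2 ≠ i)]
          exact hgp hi cp hcpb.1 hcpb.2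
        · rw [getD_set_ne _ _ _ _ hipos]
          by_cases hppos : (i-1)/2 = pos
          · rw [hppos, getD_set_self _ _ _ hlen]
            exact hmin i (by omega) hil hicp
          · rw [getD_set_ne _ _ _ _ hppos]
            exact hhole i hi hil hipos hppos
      · -- hgp at cp
        intro _ c hcc hcl
        simp only [List.length_set] at hcl
        have hcppos : (cp-1)/2 = pos := by omega
        rw [hcppos, getD_set_self _ _ _ hlen,
          getD_set_ne _ _ _ _ (by omega : c ≠ pos)]
        have hedge := hhole c (by omega) hcl (by omega) (by omega)
        have hceq : (c-1)/2 = cp := by omega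
        rw [hceq] at hedge
        exact hedge
      · rfl
    · next hnc =>
      apply siftdown_isHeap (heap.set pos newitem) newitem pos
        (by simp only [List.length_set]; omega)
      · intro i hi hil hip hpp
        simp only [List.length_set] at hil
        rw [getD_set_ne _ _ _ _ hip, getD_set_ne _ _ _ _ hpp]
        exact hhole i hi hil hip hpp
      · intro c hcc hcl
        simp only [List.length_set] at hcl
        omega
      · intro _ c hcc hcl
        simp only [List.length_set] at hcl
        omega

lemma getD_append_lt (l : List Int) (x : Int) (j : Nat) (h : j < l.length) :
    (l ++ [x]).getD j 0 = l.getD j 0 := by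
  simp [List.getD, List.getElem?_append_left h]

lemma heappush_isHeap (heap : List Int) (x : Int) (hh : IsHeap heap) :
    IsHeap (pyHeappush heap x) := by
  unfold pyHeappush
  apply siftdown_isHeap (heap ++ [x]) x heap.length (by simp)
  · intro i hi hil hip hpp
    simp only [List.length_append, List.length_singleton] at hil
    have hi2 : i < heap.length := by omega
    rw [getD_append_lt _ _ _ hi2, getD_append_lt _ _ _ (by omega)]
    exact hh i hi hi2
  · intro c hc hcl
    simp only [List.length_append, List.length_singleton] at hcl
    omega
  · intro _ c hc hcl
    simp only [List.length_append, List.length_singleton] at hcl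
    omega

lemma heappop_singleton (z : Int) : pyHeappop [z] = (z, []) := by
  simp [pyHeappop]

lemma heappop_reduce (ys : List Int) (z : Int) (hy : ys ≠ []) :
    pyHeappop (ys ++ [z]) = (ys.getD 0 0, pySiftup (ys.set 0 z) z 0 0) := by
  simp [pyHeappop, hy]

lemma heappop_fst (heap : List Int) (hne : heap ≠ []) :
    (pyHeappop heap).1 = heap.getD 0 0 := by
  rcases heap.eq_nil_or_concat with rfl | ⟨ys, z, rfl⟩
  · exact absurd rfl hne
  · simp only [List.concat_eq_append]
    rcases List.eq_nil_or_concat ys with rfl | ⟨_, _, h⟩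
    · simp [heappop_singleton, List.getD]
    · have hy : ys ≠ [] := by subst h; simp
      have hylen : 0 < ys.length := List.length_pos_iff.mpr hy
      rw [heappop_reduce _ _ hy]
      exact (getD_append_lt ys z 0 hylen).symm
lemma mset_heappop (heap : List Int) (hne : heap ≠ []) :
    (↑heap : Multiset Int) = (pyHeappop heap).1 ::ₘ (↑(pyHeappop heap).2 : Multiset Int) := by
  rcases heap.eq_nil_or_concat with rfl | ⟨ys, z, rfl⟩
  · exact absurd rfl hne
  · simp only [List.concat_eq_append]
    rcases List.eq_nil_or_concat ys with rfl | ⟨_, _, h⟩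
    · simp [heappop_singleton]
    · have hy : ys ≠ [] := by subst h; simp
      have hylen : 0 < ys.length := List.length_pos_iff.mpr hy
      rw [heappop_reduce _ _ hy]
      have h1 := mset_siftup (ys.set 0 z) z 0 (by simpa using hylen)
      rw [getD_set_self _ _ _ hylen] at h1
      have h0 : (↑(pySiftup (ys.set 0 z) z 0 0) : Multiset Int) = ↑(ys.set 0 z) :=
        add_right_cancel h1
      have h2 := mset_set ys 0 z hylen
      calc (↑(ys ++ [z]) : Multiset Int)
          = ↑ys + {z} := rfl
        _ = ↑(ys.set 0 z) + {ys.getD 0 0} := h2.symm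
        _ = ys.getD 0 0 ::ₘ ↑(pySiftup (ys.set 0 z) z 0 0) := by
            rw [h0, ← Multiset.singleton_add]; abel
lemma heappop_isHeap (heap : List Int) (hne : heap ≠ []) (hh : IsHeap heap) :
    IsHeap (pyHeappop heap).2 := by
  rcases heap.eq_nil_or_concat with rfl | ⟨ys, z, rfl⟩
  · exact absurd rfl hne
  · simp only [List.concat_eq_append] at hh ⊢
    rcases List.eq_nil_or_concat ys with rfl | ⟨_, _, h⟩
    · rw [List.nil_append, heappop_singleton]
      intro i hi hil
      simp at hil
    · have hy : ys ≠ [] := by subst h; simp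
      have hylen : 0 < ys.length := List.length_pos_iff.mpr hy
      rw [heappop_reduce _ _ hy]
      apply siftup_isHeap (ys.set 0 z) z 0 (by simpa using hylen)
      · intro i hi hil hip hpp
        simp only [List.length_set] at hil
        rw [getD_set_ne _ _ _ _ hip, getD_set_ne _ _ _ _ hpp]
        have := hh i hi (by simp; omega)
        rwa [getD_append_lt _ _ _ hil, getD_append_lt _ _ _ (by omega)] at this
      · intro h0
        omega
lemma isHeap_root_le (heap : List Int) (hh : IsHeap heap) (x : Int) (hx : x ∈ heap) :
    heap.getD 0 0 ≤ x := by
  have aux : ∀ i, i < heap.length → heap.getD 0 0 ≤ heap.getD i 0 := by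
    intro i
    induction i using Nat.strong_induction_on with
    | _ i ih =>
      intro hil
      rcases Nat.eq_zero_or_pos i with h0 | h0
      · subst h0; exact le_refl _
      · exact le_trans (ih ((i-1)/2) (by omega) (by omega)) (hh i h0 hil)
  obtain ⟨i, hil, rfl⟩ := List.getElem_of_mem hx
  have := aux i hil
  rwa [List.getD_eq_getElem _ _ hil] at this

-- B's max-scan returns an in-range index of a maximum element
def MaxAt (chosen : List Int) (r : Int) : Prop :=
  0 ≤ r ∧ r < (chosen.length : Int) ∧
    ∀ j : Int, 0 ≤ j → j < (chosen.length : Int) →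
      PySem.List.pyGetD chosen j 0 ≤ PySem.List.pyGetD chosen r 0

lemma maxScan_aux (chosen : List Int) (a mi : Int) (ha : 0 ≤ a) (h0 : 0 ≤ mi)
    (h1 : mi < (chosen.length : Int))
    (hb : ∀ j : Int, 0 ≤ j → j < a →
      PySem.List.pyGetD chosen j 0 ≤ PySem.List.pyGetD chosen mi 0) :
    MaxAt chosen ((PySem.List.pyRange a (chosen.length : Int) 1).foldl
      (fun mi i => if PySem.List.pyGetD chosen mi 0 < PySem.List.pyGetD chosen i 0 then i
                   else mi) mi) := by
  generalize hn : ((chosen.length : Int) - a).toNat = n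
  induction n generalizing a mi with
  | zero =>
    rw [PySem.List.pyRange_one_eq_nil (by omega)]
    exact ⟨h0, h1, fun j hj hj2 => hb j hj (by omega)⟩
  | succ n ih =>
    rw [PySem.List.pyRange_one_cons (by omega)]
    simp only [List.foldl_cons]
    by_cases hlt : PySem.List.pyGetD chosen mi 0 < PySem.List.pyGetD chosen a 0
    · rw [if_pos hlt]
      apply ih (a+1) a (by omega) (by omega) (by omega) ?_ (by omega)
      intro j hj hja
      rcases (by omega : j = a ∨ j < a) with rfl | hja2
      · exact le_refl _
      · exact le_trans (hb j hj hja2) (le_of_lt hlt)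
    · rw [if_neg hlt]
      apply ih (a+1) mi (by omega) h0 h1 ?_ (by omega)
      intro j hj hja
      rcases (by omega : j = a ∨ j < a) with rfl | hja2
      · exact le_of_not_gt hlt
      · exact hb j hj hja2

-- the two fold bodies, named for the proofs (definitionally the lambdas inside the ports)
def stepA : (Int × List Int) → List Int → (Int × List Int) := fun st c =>
  let duration := PySem.List.pyGetD c 0 0
  let last_day := PySem.List.pyGetD c 1 0
  let total_time := st.1 + duration
  let max_heap := pyHeappush st.2 (-duration)
  if last_day < total_time then
    let p := pyHeappop max_heap
    (total_time + p.1, p.2)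
  else (total_time, max_heap)

def stepB : (Int × List Int) → List Int → (Int × List Int) := fun st c =>
  let duration := PySem.List.pyGetD c 0 0
  let last_day := PySem.List.pyGetD c 1 0
  let chosen := st.2 ++ [duration]
  let total_time := st.1 + duration
  if last_day < total_time then
    let mi := (PySem.List.pyRange 1 (chosen.length : Int) 1).foldl
        (fun mi i => if PySem.List.pyGetD chosen mi 0 < PySem.List.pyGetD chosen i 0 then i
                     else mi) 0
    match PySem.List.pop? chosen mi with
    | some p => (total_time - p.1, p.2)
    | none => (total_time, chosen)
  else (total_time, chosen)

def CoupleInv (a b : Int × List Int) : Prop :=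
  a.1 = b.1 ∧ IsHeap a.2 ∧ (↑a.2 : Multiset Int) = (↑b.2 : Multiset Int).map (fun x => -x)

lemma step_coupling (st st' : Int × List Int) (c : List Int) (h : CoupleInv st st') :
    CoupleInv (stepA st c) (stepB st' c) := by
  obtain ⟨ht, hh, hm⟩ := h
  unfold CoupleInv stepA stepB
  dsimp only
  rw [ht]
  set d := PySem.List.pyGetD c 0 0 with hd
  set l := PySem.List.pyGetD c 1 0 with hl
  set ch := st'.2 ++ [d] with hch
  set hp := pyHeappush st.2 (-d) with hhp
  have hh' : IsHeap hp := heappush_isHeap _ _ hh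
  have hm' : (↑hp : Multiset Int) = (↑ch : Multiset Int).map (fun x => -x) := by
    rw [hhp, mset_heappush, hm, hch]
    show _ = Multiset.map _ ((↑st'.2 : Multiset Int) + {d})
    rw [Multiset.map_add, Multiset.map_singleton, ← Multiset.singleton_add]
    abel
  by_cases hcond : l < st'.1 + d
  · rw [if_pos hcond, if_pos hcond]
    have hchne : ch ≠ [] := by simp [hch]
    have hlen : hp.length = ch.length := by
      have hcard := congrArg Multiset.card hm'
      simpa using hcard
    have hpne : hp ≠ [] := by
      intro h0
      rw [h0] at hlen
      exact hchne (List.eq_nil_of_length_eq_zero hlen.symm)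
    have hMax := maxScan_aux ch 1 0 (by omega) (by omega)
      (by have := List.length_pos_iff.mpr hchne; omega)
      (by intro j hj hj1
          have hj0 : j = 0 := by omega
          subst hj0
          exact le_refl _)
    set mi := (PySem.List.pyRange 1 (ch.length : Int) 1).foldl
        (fun mi i => if PySem.List.pyGetD ch mi 0 < PySem.List.pyGetD ch i 0 then i
                     else mi) 0 with hmi
    obtain ⟨hmi0, hmilt, hmimax⟩ := hMax
    set n := mi.toNat with hn
    have hmin : mi = (n : Int) := (Int.toNat_of_nonneg hmi0).symm
    have hnlt : n < ch.length := by omega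
    have hpop : PySem.List.pop? ch mi = some (ch[n], ch.eraseIdx n) := by
      rw [hmin]
      exact PySem.List.pop?_natCast ch n hnlt
    rw [hpop]
    dsimp only
    have hv : ∀ x ∈ ch, x ≤ ch[n] := by
      intro x hx
      obtain ⟨j, hj, rfl⟩ := List.getElem_of_mem hx
      have hle := hmimax (j : Int) (Int.natCast_nonneg j) (by exact_mod_cast hj)
      rw [PySem.List.pyGetD_natCast, hmin, PySem.List.pyGetD_natCast,
        List.getD_eq_getElem _ _ hj, List.getD_eq_getElem _ _ hnlt] at hle
      exact hle
    have hvmem : ch[n] ∈ ch := List.getElem_mem hnlt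
    have hroot : hp.getD 0 0 = -ch[n] := by
      have h0 : 0 < hp.length := by
        rw [hlen]
        exact List.length_pos_iff.mpr hchne
      have hrmem : hp.getD 0 0 ∈ hp := by
        rw [List.getD_eq_getElem _ _ h0]
        exact List.getElem_mem h0
      have hnegmem : -ch[n] ∈ hp := by
        have hmem : -ch[n] ∈ (↑ch : Multiset Int).map (fun x => -x) :=
          Multiset.mem_map_of_mem _ (by exact_mod_cast hvmem)
        rw [← hm'] at hmem
        exact_mod_cast hmem
      have h1 : hp.getD 0 0 ≤ -ch[n] := isHeap_root_le hp hh' _ hnegmem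
      have h2 : -ch[n] ≤ hp.getD 0 0 := by
        have hmem : hp.getD 0 0 ∈ (↑ch : Multiset Int).map (fun x => -x) := by
          rw [← hm']
          exact_mod_cast hrmem
        obtain ⟨u, hu, heq⟩ := Multiset.mem_map.mp hmem
        have := hv u (by exact_mod_cast hu)
        omega
      omega
    have hfst : (pyHeappop hp).1 = -ch[n] := by rw [heappop_fst hp hpne, hroot]
    have hch2 : (↑ch : Multiset Int) = ch[n] ::ₘ ↑(ch.eraseIdx n) := by
      rw [Multiset.cons_coe]
      exact Multiset.coe_eq_coe.mpr (List.getElem_cons_eraseIdx_perm hnlt).symm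
    refine ⟨?_, heappop_isHeap hp hpne hh', ?_⟩
    · dsimp only
      rw [hfst]
      ring
    · dsimp only
      have hpm := mset_heappop hp hpne
      rw [hfst, hm', hch2, Multiset.map_cons] at hpm
      exact (Multiset.cons_inj_right _).mp hpm.symm
  · rw [if_neg hcond, if_neg hcond]
    exact ⟨rfl, hh', hm'⟩

lemma fold_coupling (cs : List (List Int)) (st st' : Int × List Int) (h : CoupleInv st st') :
    CoupleInv (cs.foldl stepA st) (cs.foldl stepB st') := by
  induction cs generalizing st st' with
  | nil => exact h
  | cons c cs ih => exact ih _ _ (step_coupling _ _ _ h)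

-- ===== VERDICT (by name: the statement is the Claim_ definition above) =====
theorem solve_spec : Claim_equal_solve := by
  intro courses _ _
  have h := fold_coupling (PySem.List.sorted courses (fun x => PySem.List.pyGetD x 1 0))
      (0, []) (0, []) ⟨rfl, by intro i hi hlen; simp at hlen, by simp⟩
  obtain ⟨-, -, hm⟩ := h
  have hc := congrArg Multiset.card hm
  simp only [Multiset.card_map, Multiset.coe_card] at hc
  show ((((PySem.List.sorted courses (fun x => PySem.List.pyGetD x 1 0)).foldl stepA
      (0, [])).2.length : Nat) : Int)
    = ((((PySem.List.sorted courses (fun x => PySem.List.pyGetD x 1 0)).foldl stepB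
      (0, [])).2.length : Nat) : Int)
  exact_mod_cast hc
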